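-- pv_equiv track=rewrite | github.com/angiew7/Wang-PWave-Amplitude-Estimation | pwave.py | find_first_right_maximum
-- ===== SOURCE A (Python) =====
-- def find_first_right_maximum(x):
--     # Find the first maximum in x starting at the right side of x
--     # and return the index of this maximum
--
--     i = len(x)-2 # Set i to the second-to-last last index in ix
--     found_maximum = False
--     while i>0:
--         if x[i]>x[i-1] and x[i]>x[i+1]:
--             found_maximum = True
--             break
--         i -= 1
--     if not found_maximum:
--         return None
--     return i
-- ===== SOURCE B (Python) =====
-- def find_first_right_maximum(x):
--     # Forward scan remembering the last local maximum index; the last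
--     # qualifying index of a forward scan is the first one a right-to-left
--     # scan hits, so this matches the original.
--     result = None
--     for i in range(1, len(x) - 1):
--         if x[i] > x[i - 1] and x[i] > x[i + 1]:
--             result = i
--     return result
-- ===== Notes on version B (the rewrite author's own statement) =====
-- stated objective: alternative
-- what changed: Replaced the right-to-left while loop that breaks on the first local maximum with a left-to-right for loop over range(1, len(x)-1) keeping the last qualifying index in an accumulator.
import Mathlib
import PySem

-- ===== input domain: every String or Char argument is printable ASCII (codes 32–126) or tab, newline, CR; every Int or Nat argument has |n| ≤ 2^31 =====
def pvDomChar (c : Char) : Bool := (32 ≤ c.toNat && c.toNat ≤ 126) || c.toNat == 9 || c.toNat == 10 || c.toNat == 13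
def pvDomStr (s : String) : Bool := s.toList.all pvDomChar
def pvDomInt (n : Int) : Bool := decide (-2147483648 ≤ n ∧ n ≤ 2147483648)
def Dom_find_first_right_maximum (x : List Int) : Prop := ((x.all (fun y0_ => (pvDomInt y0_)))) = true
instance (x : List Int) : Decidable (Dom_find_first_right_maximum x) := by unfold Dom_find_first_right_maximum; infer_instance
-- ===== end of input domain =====

-- B replaces A's right-to-left break-on-first-hit while loop by a forward
-- scan that remembers the last qualifying index (alternative decomposition).

-- ===== PORT A =====
-- A's loop: i counts down from len-2, returns at the first local maximum.
-- Indices touched (i-1, i, i+1) are always in range while 0 < i ≤ len-2,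
-- so List.getD is exact here.
def pvACond (x : List Int) (i : Nat) : Bool :=
  decide (x.getD i 0 > x.getD (i-1) 0) && decide (x.getD i 0 > x.getD (i+1) 0)

def pvALoop (x : List Int) : Nat → Option Int
  | 0 => none
  | i+1 => if pvACond x (i+1) then some ((i : Int) + 1) else pvALoop x i

def find_first_right_maximum (x : List Int) : Option Int :=
  pvALoop x (x.length - 2)

-- ===== PORT B =====
def find_first_right_maximum_alt (x : List Int) : Option Int :=
  (PySem.List.pyRange 1 ((x.length : Int) - 1) 1).foldl
    (fun result i =>
      if decide (x.getD i.toNat 0 > x.getD (i.toNat - 1) 0) &&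
         decide (x.getD i.toNat 0 > x.getD (i.toNat + 1) 0)
      then some i else result)
    none

-- ===== PRECONDITION & SPEC =====
def Spec_find_first_right_maximum (x : List Int) (out : Option Int) : Prop := out = find_first_right_maximum_alt x
instance (x : List Int) (out : Option Int) : Decidable (Spec_find_first_right_maximum x out) := by unfold Spec_find_first_right_maximum; infer_instance

-- ===== CLAIM =====
def Claim_equal_find_first_right_maximum : Prop := ∀ (x : List Int), Dom_find_first_right_maximum x → Spec_find_first_right_maximum x (find_first_right_maximum x)

-- ===== LEMMAS AND PROOFS =====
-- The forward last-match fold over [1..k] equals A's countdown first-match from k.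
theorem pvFold_eq_aLoop (x : List Int) (k : Nat) :
    (PySem.List.pyRange 1 ((k : Int) + 1) 1).foldl
      (fun result i =>
        if decide (x.getD i.toNat 0 > x.getD (i.toNat - 1) 0) &&
           decide (x.getD i.toNat 0 > x.getD (i.toNat + 1) 0)
        then some i else result)
      none = pvALoop x k := by
  induction k with
  | zero => simp [PySem.List.pyRange_one_eq_nil, pvALoop]
  | succ k ih =>
    rw [show ((k + 1 : Nat) : Int) + 1 = ((k : Int) + 1) + 1 by push_cast; ring,
        PySem.List.pyRange_one_succ_right (by omega), List.foldl_append, ih]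
    simp only [List.foldl_cons, List.foldl_nil, pvALoop, pvACond]
    have ht : ((k : Int) + 1).toNat = k + 1 := by omega
    rw [ht]
    split_ifs with h
    · simp
    · rfl

theorem pv_main (x : List Int) :
    find_first_right_maximum x = find_first_right_maximum_alt x := by
  unfold find_first_right_maximum find_first_right_maximum_alt
  rcases x with _ | ⟨a, _ | ⟨b, xs⟩⟩
  · simp [PySem.List.pyRange_one_eq_nil, pvALoop]
  · simp [PySem.List.pyRange_one_eq_nil, pvALoop]
  · have hlen : ((a :: b :: xs).length : Int) - 1 = (((a :: b :: xs).length - 2 : Nat) : Int) + 1 := by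
      simp [List.length_cons]
    rw [hlen, pvFold_eq_aLoop]

-- ===== VERDICT =====
theorem find_first_right_maximum_spec : Claim_equal_find_first_right_maximum := by
  intro x _
  exact pv_main x
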